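-- pv_equiv track=rewrite | github.com/brunofariasdeo/CodeChallenges | CodeWars/Python/7Kyu/ThePoetAndThePendulum.py | pendulum
-- ===== SOURCE A (Python) =====
-- def pendulum(values):
--     values = sorted(values)
--
--     tempString = ""
--
--     for index, number in enumerate(values):
--         if index%2 == 0:
--             tempString = str(number) + "," + tempString
--         else:
--             tempString = tempString + str(number) + ","
--
--     return list(map(int, tempString[:-1].split(",")))
-- ===== SOURCE B (Python) =====
-- def pendulum(values):
--     ordered = sorted(values)
--     return ordered[0::2][::-1] + ordered[1::2]
-- ===== Notes on version B (the rewrite author's own statement) =====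
-- stated objective: simpler
-- what changed: B replaces A's string round-trip (building a comma-joined string element by element, then slicing, splitting and re-parsing ints) by two direct extended slices of the sorted list: sorted[0::2][::-1] + sorted[1::2].
import Mathlib
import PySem

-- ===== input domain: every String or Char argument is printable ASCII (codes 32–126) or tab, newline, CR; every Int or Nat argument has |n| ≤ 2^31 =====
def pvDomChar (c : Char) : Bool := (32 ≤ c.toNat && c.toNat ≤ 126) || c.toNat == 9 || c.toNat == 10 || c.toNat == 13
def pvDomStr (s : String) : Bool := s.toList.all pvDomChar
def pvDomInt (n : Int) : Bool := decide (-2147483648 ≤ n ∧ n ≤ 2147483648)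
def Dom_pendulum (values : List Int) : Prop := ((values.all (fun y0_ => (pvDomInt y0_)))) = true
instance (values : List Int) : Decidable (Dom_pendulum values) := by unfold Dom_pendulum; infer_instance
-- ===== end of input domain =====

-- B replaces A's string round-trip by two extended slices of the sorted list (objective: simpler).
-- ===== PORT A =====
def pendulum (values : List Int) : List Int :=
  let values' := PySem.List.sorted values (fun x => x) false
  let tempString := (PySem.List.enumerate values').foldl
    (fun tempString p =>
      if PySem.Int.mod p.1 2 == 0 then PySem.Int.toStr p.2 ++ "," ++ tempString
      else tempString ++ PySem.Int.toStr p.2 ++ ",") ""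
  -- list(map(int, tempString[:-1].split(","))): split never fails (sep ","  ≠ ""), int(piece)
  -- raises ValueError only for values = [] (piece ""), which Pre_pendulum excludes; .getD covers those
  ((PySem.Str.split? (PySem.Str.slice tempString none (some (-1))) ",").getD []).map
    (fun s => (PySem.Int.ofStr? s).getD 0)

-- ===== PORT B =====
def pendulum_alt (values : List Int) : List Int :=
  let ordered := PySem.List.sorted values (fun x => x) false
  -- ordered[0::2][::-1] + ordered[1::2]  (step slices never fail: step ≠ 0, so .getD [] is never the default)
  ((PySem.List.slice? ((PySem.List.slice? ordered (some 0) none 2).getD []) none none (-1)).getD [])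
    ++ (PySem.List.slice? ordered (some 1) none 2).getD []

-- ===== PRECONDITION & SPEC =====
-- Pre_ excludes only the empty list, on which A raises ValueError (int("") after splitting "").
def Pre_pendulum (values : List Int) : Prop := values ≠ []
instance (values : List Int) : Decidable (Pre_pendulum values) := by unfold Pre_pendulum; infer_instance
def pvWitness_pendulum : List Int := [3, 1, 2]

def Spec_pendulum (values : List Int) (out : List Int) : Prop := out = pendulum_alt values
instance (values : List Int) (out : List Int) : Decidable (Spec_pendulum values out) := by unfold Spec_pendulum; infer_instance

-- ===== CLAIM (what is proved, stated in full; the proofs are below) =====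
def Claim_equal_pendulum : Prop := ∀ (values : List Int), Dom_pendulum values → Pre_pendulum values → Spec_pendulum values (pendulum values)

-- ===== LEMMAS AND PROOFS =====

-- ---- Part 1: Python int(str(n)) round-trip, via a captured view of PySem's private digit parser ----

theorem pvDropWhile_eq_self {p : Char → Bool} {l : List Char} (h : ∀ x ∈ l, p x = false) :
    List.dropWhile p l = l := by
  cases l with
  | nil => rfl
  | cons a as => rw [List.dropWhile_cons_of_neg]; simp [h a (by simp)]

theorem pvStrip_eq_self {p : Char → Bool} {l : List Char} (h : ∀ x ∈ l, p x = false) :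
    (List.dropWhile p (List.dropWhile p l).reverse).reverse = l := by
  rw [pvDropWhile_eq_self h, pvDropWhile_eq_self (by simpa using fun x hx => h x hx),
    List.reverse_reverse]

-- ofChars? delegates to a private digit-accumulator; we capture it as `g` together with the
-- equations the proofs need (assigned by unification, each conjunct closed by reduction).
theorem pvCapture : ∃ g : List Char → Bool → Nat → Option Nat,
    (∀ b acc, g [] b acc = if b then some acc else none) ∧
    (∀ rest b acc, g ('0'::rest) b acc = g rest true (acc*10 + 0)) ∧
    (∀ rest b acc, g ('1'::rest) b acc = g rest true (acc*10 + 1)) ∧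
    (∀ rest b acc, g ('2'::rest) b acc = g rest true (acc*10 + 2)) ∧
    (∀ rest b acc, g ('3'::rest) b acc = g rest true (acc*10 + 3)) ∧
    (∀ rest b acc, g ('4'::rest) b acc = g rest true (acc*10 + 4)) ∧
    (∀ rest b acc, g ('5'::rest) b acc = g rest true (acc*10 + 5)) ∧
    (∀ rest b acc, g ('6'::rest) b acc = g rest true (acc*10 + 6)) ∧
    (∀ rest b acc, g ('7'::rest) b acc = g rest true (acc*10 + 7)) ∧
    (∀ rest b acc, g ('8'::rest) b acc = g rest true (acc*10 + 8)) ∧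
    (∀ rest b acc, g ('9'::rest) b acc = g rest true (acc*10 + 9)) ∧
    (∀ tl, (∀ x ∈ tl, PySem.Int.isIntSpace x = false) →
      PySem.Int.ofChars? ('0'::tl) = Option.map (fun n : Int => n) ((g tl true 0).bind fun a => some ((a:Int)))) ∧
    (∀ tl, (∀ x ∈ tl, PySem.Int.isIntSpace x = false) →
      PySem.Int.ofChars? ('1'::tl) = Option.map (fun n : Int => n) ((g tl true 1).bind fun a => some ((a:Int)))) ∧
    (∀ tl, (∀ x ∈ tl, PySem.Int.isIntSpace x = false) →
      PySem.Int.ofChars? ('2'::tl) = Option.map (fun n : Int => n) ((g tl true 2).bind fun a => some ((a:Int)))) ∧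
    (∀ tl, (∀ x ∈ tl, PySem.Int.isIntSpace x = false) →
      PySem.Int.ofChars? ('3'::tl) = Option.map (fun n : Int => n) ((g tl true 3).bind fun a => some ((a:Int)))) ∧
    (∀ tl, (∀ x ∈ tl, PySem.Int.isIntSpace x = false) →
      PySem.Int.ofChars? ('4'::tl) = Option.map (fun n : Int => n) ((g tl true 4).bind fun a => some ((a:Int)))) ∧
    (∀ tl, (∀ x ∈ tl, PySem.Int.isIntSpace x = false) →
      PySem.Int.ofChars? ('5'::tl) = Option.map (fun n : Int => n) ((g tl true 5).bind fun a => some ((a:Int)))) ∧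
    (∀ tl, (∀ x ∈ tl, PySem.Int.isIntSpace x = false) →
      PySem.Int.ofChars? ('6'::tl) = Option.map (fun n : Int => n) ((g tl true 6).bind fun a => some ((a:Int)))) ∧
    (∀ tl, (∀ x ∈ tl, PySem.Int.isIntSpace x = false) →
      PySem.Int.ofChars? ('7'::tl) = Option.map (fun n : Int => n) ((g tl true 7).bind fun a => some ((a:Int)))) ∧
    (∀ tl, (∀ x ∈ tl, PySem.Int.isIntSpace x = false) →
      PySem.Int.ofChars? ('8'::tl) = Option.map (fun n : Int => n) ((g tl true 8).bind fun a => some ((a:Int)))) ∧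
    (∀ tl, (∀ x ∈ tl, PySem.Int.isIntSpace x = false) →
      PySem.Int.ofChars? ('9'::tl) = Option.map (fun n : Int => n) ((g tl true 9).bind fun a => some ((a:Int)))) ∧
    (∀ tl, (∀ x ∈ tl, PySem.Int.isIntSpace x = false) →
      PySem.Int.ofChars? ('-'::'0'::tl) = Option.map (fun n : Int => -n) ((g tl true 0).bind fun a => some ((a:Int)))) ∧
    (∀ tl, (∀ x ∈ tl, PySem.Int.isIntSpace x = false) →
      PySem.Int.ofChars? ('-'::'1'::tl) = Option.map (fun n : Int => -n) ((g tl true 1).bind fun a => some ((a:Int)))) ∧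
    (∀ tl, (∀ x ∈ tl, PySem.Int.isIntSpace x = false) →
      PySem.Int.ofChars? ('-'::'2'::tl) = Option.map (fun n : Int => -n) ((g tl true 2).bind fun a => some ((a:Int)))) ∧
    (∀ tl, (∀ x ∈ tl, PySem.Int.isIntSpace x = false) →
      PySem.Int.ofChars? ('-'::'3'::tl) = Option.map (fun n : Int => -n) ((g tl true 3).bind fun a => some ((a:Int)))) ∧
    (∀ tl, (∀ x ∈ tl, PySem.Int.isIntSpace x = false) →
      PySem.Int.ofChars? ('-'::'4'::tl) = Option.map (fun n : Int => -n) ((g tl true 4).bind fun a => some ((a:Int)))) ∧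
    (∀ tl, (∀ x ∈ tl, PySem.Int.isIntSpace x = false) →
      PySem.Int.ofChars? ('-'::'5'::tl) = Option.map (fun n : Int => -n) ((g tl true 5).bind fun a => some ((a:Int)))) ∧
    (∀ tl, (∀ x ∈ tl, PySem.Int.isIntSpace x = false) →
      PySem.Int.ofChars? ('-'::'6'::tl) = Option.map (fun n : Int => -n) ((g tl true 6).bind fun a => some ((a:Int)))) ∧
    (∀ tl, (∀ x ∈ tl, PySem.Int.isIntSpace x = false) →
      PySem.Int.ofChars? ('-'::'7'::tl) = Option.map (fun n : Int => -n) ((g tl true 7).bind fun a => some ((a:Int)))) ∧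
    (∀ tl, (∀ x ∈ tl, PySem.Int.isIntSpace x = false) →
      PySem.Int.ofChars? ('-'::'8'::tl) = Option.map (fun n : Int => -n) ((g tl true 8).bind fun a => some ((a:Int)))) ∧
    (∀ tl, (∀ x ∈ tl, PySem.Int.isIntSpace x = false) →
      PySem.Int.ofChars? ('-'::'9'::tl) = Option.map (fun n : Int => -n) ((g tl true 9).bind fun a => some ((a:Int)))) := by
  refine ⟨?g, ?hnil, ?hs0, ?hs1, ?hs2, ?hs3, ?hs4, ?hs5, ?hs6, ?hs7, ?hs8, ?hs9, ?hp0, ?hp1, ?hp2, ?hp3, ?hp4, ?hp5, ?hp6, ?hp7, ?hp8, ?hp9, ?hn0, ?hn1, ?hn2, ?hn3, ?hn4, ?hn5, ?hn6, ?hn7, ?hn8, ?hn9⟩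
  case hp0 =>
    intro tl hs
    simp only [PySem.Int.ofChars?]
    rw [pvStrip_eq_self (l := '0'::tl) ?side]
    case side =>
      intro x hx
      rcases List.mem_cons.mp hx with h | h
      · subst h; decide
      · exact hs x h
    split
    · rename_i ds hds; exact absurd hds (by simp)
    · rename_i ds hds; exact absurd hds (by simp)
    · refine congrArg _ ?_
      rfl
  case hp1 =>
    intro tl hs
    simp only [PySem.Int.ofChars?]
    rw [pvStrip_eq_self (l := '1'::tl) ?side]
    case side =>
      intro x hx
      rcases List.mem_cons.mp hx with h | h
      · subst h; decide
      · exact hs x h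
    split
    · rename_i ds hds; exact absurd hds (by simp)
    · rename_i ds hds; exact absurd hds (by simp)
    · refine congrArg _ ?_
      rfl
  case hp2 =>
    intro tl hs
    simp only [PySem.Int.ofChars?]
    rw [pvStrip_eq_self (l := '2'::tl) ?side]
    case side =>
      intro x hx
      rcases List.mem_cons.mp hx with h | h
      · subst h; decide
      · exact hs x h
    split
    · rename_i ds hds; exact absurd hds (by simp)
    · rename_i ds hds; exact absurd hds (by simp)
    · refine congrArg _ ?_
      rfl
  case hp3 =>
    intro tl hs
    simp only [PySem.Int.ofChars?]
    rw [pvStrip_eq_self (l := '3'::tl) ?side]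
    case side =>
      intro x hx
      rcases List.mem_cons.mp hx with h | h
      · subst h; decide
      · exact hs x h
    split
    · rename_i ds hds; exact absurd hds (by simp)
    · rename_i ds hds; exact absurd hds (by simp)
    · refine congrArg _ ?_
      rfl
  case hp4 =>
    intro tl hs
    simp only [PySem.Int.ofChars?]
    rw [pvStrip_eq_self (l := '4'::tl) ?side]
    case side =>
      intro x hx
      rcases List.mem_cons.mp hx with h | h
      · subst h; decide
      · exact hs x h
    split
    · rename_i ds hds; exact absurd hds (by simp)
    · rename_i ds hds; exact absurd hds (by simp)
    · refine congrArg _ ?_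
      rfl
  case hp5 =>
    intro tl hs
    simp only [PySem.Int.ofChars?]
    rw [pvStrip_eq_self (l := '5'::tl) ?side]
    case side =>
      intro x hx
      rcases List.mem_cons.mp hx with h | h
      · subst h; decide
      · exact hs x h
    split
    · rename_i ds hds; exact absurd hds (by simp)
    · rename_i ds hds; exact absurd hds (by simp)
    · refine congrArg _ ?_
      rfl
  case hp6 =>
    intro tl hs
    simp only [PySem.Int.ofChars?]
    rw [pvStrip_eq_self (l := '6'::tl) ?side]
    case side =>
      intro x hx
      rcases List.mem_cons.mp hx with h | h
      · subst h; decide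
      · exact hs x h
    split
    · rename_i ds hds; exact absurd hds (by simp)
    · rename_i ds hds; exact absurd hds (by simp)
    · refine congrArg _ ?_
      rfl
  case hp7 =>
    intro tl hs
    simp only [PySem.Int.ofChars?]
    rw [pvStrip_eq_self (l := '7'::tl) ?side]
    case side =>
      intro x hx
      rcases List.mem_cons.mp hx with h | h
      · subst h; decide
      · exact hs x h
    split
    · rename_i ds hds; exact absurd hds (by simp)
    · rename_i ds hds; exact absurd hds (by simp)
    · refine congrArg _ ?_
      rfl
  case hp8 =>
    intro tl hs
    simp only [PySem.Int.ofChars?]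
    rw [pvStrip_eq_self (l := '8'::tl) ?side]
    case side =>
      intro x hx
      rcases List.mem_cons.mp hx with h | h
      · subst h; decide
      · exact hs x h
    split
    · rename_i ds hds; exact absurd hds (by simp)
    · rename_i ds hds; exact absurd hds (by simp)
    · refine congrArg _ ?_
      rfl
  case hp9 =>
    intro tl hs
    simp only [PySem.Int.ofChars?]
    rw [pvStrip_eq_self (l := '9'::tl) ?side]
    case side =>
      intro x hx
      rcases List.mem_cons.mp hx with h | h
      · subst h; decide
      · exact hs x h
    split
    · rename_i ds hds; exact absurd hds (by simp)
    · rename_i ds hds; exact absurd hds (by simp)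
    · refine congrArg _ ?_
      rfl
  case hn0 =>
    intro tl hs
    simp only [PySem.Int.ofChars?]
    rw [pvStrip_eq_self (l := '-'::'0'::tl) ?side]
    case side =>
      intro x hx
      rcases List.mem_cons.mp hx with h | h
      · subst h; decide
      rcases List.mem_cons.mp h with h | h
      · subst h; decide
      · exact hs x h
    split
    · rename_i ds hds
      injection hds with _ h2
      subst h2
      refine congrArg _ ?_
      rfl
    · rename_i ds hds; exact absurd hds (by simp)
    · rename_i hne1 hne2; exact absurd rfl (hne1 ('0'::tl))
  case hn1 =>
    intro tl hs
    simp only [PySem.Int.ofChars?]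
    rw [pvStrip_eq_self (l := '-'::'1'::tl) ?side]
    case side =>
      intro x hx
      rcases List.mem_cons.mp hx with h | h
      · subst h; decide
      rcases List.mem_cons.mp h with h | h
      · subst h; decide
      · exact hs x h
    split
    · rename_i ds hds
      injection hds with _ h2
      subst h2
      refine congrArg _ ?_
      rfl
    · rename_i ds hds; exact absurd hds (by simp)
    · rename_i hne1 hne2; exact absurd rfl (hne1 ('1'::tl))
  case hn2 =>
    intro tl hs
    simp only [PySem.Int.ofChars?]
    rw [pvStrip_eq_self (l := '-'::'2'::tl) ?side]
    case side =>
      intro x hx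
      rcases List.mem_cons.mp hx with h | h
      · subst h; decide
      rcases List.mem_cons.mp h with h | h
      · subst h; decide
      · exact hs x h
    split
    · rename_i ds hds
      injection hds with _ h2
      subst h2
      refine congrArg _ ?_
      rfl
    · rename_i ds hds; exact absurd hds (by simp)
    · rename_i hne1 hne2; exact absurd rfl (hne1 ('2'::tl))
  case hn3 =>
    intro tl hs
    simp only [PySem.Int.ofChars?]
    rw [pvStrip_eq_self (l := '-'::'3'::tl) ?side]
    case side =>
      intro x hx
      rcases List.mem_cons.mp hx with h | h
      · subst h; decide
      rcases List.mem_cons.mp h with h | h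
      · subst h; decide
      · exact hs x h
    split
    · rename_i ds hds
      injection hds with _ h2
      subst h2
      refine congrArg _ ?_
      rfl
    · rename_i ds hds; exact absurd hds (by simp)
    · rename_i hne1 hne2; exact absurd rfl (hne1 ('3'::tl))
  case hn4 =>
    intro tl hs
    simp only [PySem.Int.ofChars?]
    rw [pvStrip_eq_self (l := '-'::'4'::tl) ?side]
    case side =>
      intro x hx
      rcases List.mem_cons.mp hx with h | h
      · subst h; decide
      rcases List.mem_cons.mp h with h | h
      · subst h; decide
      · exact hs x h
    split
    · rename_i ds hds
      injection hds with _ h2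
      subst h2
      refine congrArg _ ?_
      rfl
    · rename_i ds hds; exact absurd hds (by simp)
    · rename_i hne1 hne2; exact absurd rfl (hne1 ('4'::tl))
  case hn5 =>
    intro tl hs
    simp only [PySem.Int.ofChars?]
    rw [pvStrip_eq_self (l := '-'::'5'::tl) ?side]
    case side =>
      intro x hx
      rcases List.mem_cons.mp hx with h | h
      · subst h; decide
      rcases List.mem_cons.mp h with h | h
      · subst h; decide
      · exact hs x h
    split
    · rename_i ds hds
      injection hds with _ h2
      subst h2
      refine congrArg _ ?_
      rfl
    · rename_i ds hds; exact absurd hds (by simp)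
    · rename_i hne1 hne2; exact absurd rfl (hne1 ('5'::tl))
  case hn6 =>
    intro tl hs
    simp only [PySem.Int.ofChars?]
    rw [pvStrip_eq_self (l := '-'::'6'::tl) ?side]
    case side =>
      intro x hx
      rcases List.mem_cons.mp hx with h | h
      · subst h; decide
      rcases List.mem_cons.mp h with h | h
      · subst h; decide
      · exact hs x h
    split
    · rename_i ds hds
      injection hds with _ h2
      subst h2
      refine congrArg _ ?_
      rfl
    · rename_i ds hds; exact absurd hds (by simp)
    · rename_i hne1 hne2; exact absurd rfl (hne1 ('6'::tl))
  case hn7 =>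
    intro tl hs
    simp only [PySem.Int.ofChars?]
    rw [pvStrip_eq_self (l := '-'::'7'::tl) ?side]
    case side =>
      intro x hx
      rcases List.mem_cons.mp hx with h | h
      · subst h; decide
      rcases List.mem_cons.mp h with h | h
      · subst h; decide
      · exact hs x h
    split
    · rename_i ds hds
      injection hds with _ h2
      subst h2
      refine congrArg _ ?_
      rfl
    · rename_i ds hds; exact absurd hds (by simp)
    · rename_i hne1 hne2; exact absurd rfl (hne1 ('7'::tl))
  case hn8 =>
    intro tl hs
    simp only [PySem.Int.ofChars?]
    rw [pvStrip_eq_self (l := '-'::'8'::tl) ?side]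
    case side =>
      intro x hx
      rcases List.mem_cons.mp hx with h | h
      · subst h; decide
      rcases List.mem_cons.mp h with h | h
      · subst h; decide
      · exact hs x h
    split
    · rename_i ds hds
      injection hds with _ h2
      subst h2
      refine congrArg _ ?_
      rfl
    · rename_i ds hds; exact absurd hds (by simp)
    · rename_i hne1 hne2; exact absurd rfl (hne1 ('8'::tl))
  case hn9 =>
    intro tl hs
    simp only [PySem.Int.ofChars?]
    rw [pvStrip_eq_self (l := '-'::'9'::tl) ?side]
    case side =>
      intro x hx
      rcases List.mem_cons.mp hx with h | h
      · subst h; decide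
      rcases List.mem_cons.mp h with h | h
      · subst h; decide
      · exact hs x h
    split
    · rename_i ds hds
      injection hds with _ h2
      subst h2
      refine congrArg _ ?_
      rfl
    · rename_i ds hds; exact absurd hds (by simp)
    · rename_i hne1 hne2; exact absurd rfl (hne1 ('9'::tl))
  case hnil => intro b acc; rfl
  case hs0 => intro rest b acc; rfl
  case hs1 => intro rest b acc; rfl
  case hs2 => intro rest b acc; rfl
  case hs3 => intro rest b acc; rfl
  case hs4 => intro rest b acc; rfl
  case hs5 => intro rest b acc; rfl
  case hs6 => intro rest b acc; rfl
  case hs7 => intro rest b acc; rfl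
  case hs8 => intro rest b acc; rfl
  case hs9 => intro rest b acc; rfl
theorem pvDigit_cases {c : Char} (h : c.isDigit = true) :
    c = '0' ∨ c = '1' ∨ c = '2' ∨ c = '3' ∨ c = '4' ∨ c = '5' ∨ c = '6' ∨ c = '7' ∨ c = '8' ∨ c = '9' := by
  unfold Char.isDigit at h
  simp at h
  obtain ⟨h1, h2⟩ := h
  have hlo : 48 ≤ c.toNat := Nat.succ_le_of_lt h1
  have hhi : c.toNat ≤ 57 := Fin.mk_le_mk.mp h2
  have hofn : c = Char.ofNat c.toNat := (Char.ofNat_toNat c).symm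
  interval_cases h : c.toNat <;> rw [hofn] <;> decide
theorem pvDigit_nonspace {c : Char} (h : c.isDigit = true) : PySem.Int.isIntSpace c = false := by
  rcases pvDigit_cases h with h|h|h|h|h|h|h|h|h|h <;> subst h <;> decide

theorem pvDigitChar_isDigit {r : Nat} (h : r < 10) : (Nat.digitChar r).isDigit = true := by
  interval_cases r <;> decide

theorem pvDigitChar_val {r : Nat} (h : r < 10) : (Nat.digitChar r).toNat - 48 = r := by
  interval_cases r <;> decide

theorem pvToDigits_digits : ∀ m : Nat, ∀ c ∈ Nat.toDigits 10 m, c.isDigit = true := by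
  intro m
  induction m using Nat.strong_induction_on with
  | _ m ih =>
    intro c hc
    rw [Nat.toDigits_eq_if (by norm_num)] at hc
    split at hc
    · simp at hc
      subst hc
      exact pvDigitChar_isDigit (by omega)
    · rcases List.mem_append.mp hc with h | h
      · exact ih (m / 10) (Nat.div_lt_self (by omega) (by norm_num)) c h
      · simp at h
        subst h
        exact pvDigitChar_isDigit (Nat.mod_lt _ (by norm_num))

theorem pvToDigits_ne_nil (m : Nat) : Nat.toDigits 10 m ≠ [] := by
  rw [Nat.toDigits_eq_if (by norm_num)]
  split <;> simp

theorem pvToDigits_val : ∀ m acc : Nat,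
    (Nat.toDigits 10 m).foldl (fun a c => a * 10 + (c.toNat - 48)) acc
      = acc * 10 ^ (Nat.toDigits 10 m).length + m := by
  intro m
  induction m using Nat.strong_induction_on with
  | _ m ih =>
    intro acc
    by_cases hm : m < 10
    · rw [Nat.toDigits_of_lt_base hm]
      simp [pvDigitChar_val hm]
    · rw [Nat.toDigits_of_base_le (by norm_num) (by omega)]
      rw [List.foldl_append]
      rw [ih (m / 10) (Nat.div_lt_self (by omega) (by norm_num)) acc]
      simp only [List.foldl_cons, List.foldl_nil, List.length_append, List.length_cons,
        List.length_nil]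
      rw [pvDigitChar_val (Nat.mod_lt _ (by norm_num))]
      have hdm : m / 10 * 10 + m % 10 = m := by omega
      calc (acc * 10 ^ (Nat.toDigits 10 (m / 10)).length + m / 10) * 10 + m % 10
          = acc * (10 ^ (Nat.toDigits 10 (m / 10)).length * 10) + (m / 10 * 10 + m % 10) := by ring
        _ = acc * 10 ^ ((Nat.toDigits 10 (m / 10)).length + 1) + m := by rw [hdm, pow_succ]

theorem pvRoundtrip (n : Int) : PySem.Int.ofChars? (PySem.Int.toChars n) = some n := by
  obtain ⟨g, hnil, h0, h1, h2, h3, h4, h5, h6, h7, h8, h9,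
    p0, p1, p2, p3, p4, p5, p6, p7, p8, p9,
    q0, q1, q2, q3, q4, q5, q6, q7, q8, q9⟩ := pvCapture
  have gstep : ∀ (c : Char) rest b acc, c.isDigit = true →
      g (c::rest) b acc = g rest true (acc * 10 + (c.toNat - 48)) := by
    intro c rest b acc hc
    rcases pvDigit_cases hc with h|h|h|h|h|h|h|h|h|h <;> subst h <;>
      first
        | exact h0 rest b acc | exact h1 rest b acc | exact h2 rest b acc | exact h3 rest b acc
        | exact h4 rest b acc | exact h5 rest b acc | exact h6 rest b acc | exact h7 rest b acc
        | exact h8 rest b acc | exact h9 rest b acc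
  have gdigits : ∀ ds : List Char, (∀ c ∈ ds, c.isDigit = true) → ∀ acc,
      g ds true acc = some (ds.foldl (fun a c => a * 10 + (c.toNat - 48)) acc) := by
    intro ds
    induction ds with
    | nil => intro _ acc; simp [hnil]
    | cons c tl ih =>
      intro hd acc
      rw [gstep c tl true acc (hd c (by simp)), ih (fun x hx => hd x (by simp [hx]))]
      rfl
  simp only [PySem.Int.toChars]
  split
  · -- n < 0
    rename_i hn
    set m := n.natAbs with hmdef
    obtain ⟨c, tl, hctl⟩ : ∃ c tl, Nat.toDigits 10 m = c :: tl := by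
      cases hh : Nat.toDigits 10 m with
      | nil => exact absurd hh (pvToDigits_ne_nil m)
      | cons a b => exact ⟨a, b, rfl⟩
    have hdigall : ∀ x ∈ c :: tl, x.isDigit = true := by
      rw [← hctl]; exact pvToDigits_digits m
    have hcd : c.isDigit = true := hdigall c (by simp)
    have htl : ∀ x ∈ tl, PySem.Int.isIntSpace x = false := fun x hx =>
      pvDigit_nonspace (hdigall x (by simp [hx]))
    have hval : tl.foldl (fun a c => a * 10 + (c.toNat - 48)) (c.toNat - 48) = m := by
      have := pvToDigits_val m 0
      rw [hctl] at this
      simpa using this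
    have hfin : ∀ v : Nat, v = c.toNat - 48 →
        PySem.Int.ofChars? ('-' :: c :: tl) = Option.map (fun x : Int => -x)
          ((g tl true v).bind fun a => some ((a : Int))) := by
      intro v hv
      rcases pvDigit_cases hcd with h|h|h|h|h|h|h|h|h|h <;> subst h <;> subst hv <;>
        first
          | exact q0 tl htl | exact q1 tl htl | exact q2 tl htl | exact q3 tl htl
          | exact q4 tl htl | exact q5 tl htl | exact q6 tl htl | exact q7 tl htl
          | exact q8 tl htl | exact q9 tl htl
    rw [hctl, hfin _ rfl, gdigits tl (fun x hx => hdigall x (by simp [hx])), hval]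
    simp
    omega
  · -- 0 ≤ n
    rename_i hn
    set m := n.toNat with hmdef
    obtain ⟨c, tl, hctl⟩ : ∃ c tl, Nat.toDigits 10 m = c :: tl := by
      cases hh : Nat.toDigits 10 m with
      | nil => exact absurd hh (pvToDigits_ne_nil m)
      | cons a b => exact ⟨a, b, rfl⟩
    have hdigall : ∀ x ∈ c :: tl, x.isDigit = true := by
      rw [← hctl]; exact pvToDigits_digits m
    have hcd : c.isDigit = true := hdigall c (by simp)
    have htl : ∀ x ∈ tl, PySem.Int.isIntSpace x = false := fun x hx =>
      pvDigit_nonspace (hdigall x (by simp [hx]))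
    have hval : tl.foldl (fun a c => a * 10 + (c.toNat - 48)) (c.toNat - 48) = m := by
      have := pvToDigits_val m 0
      rw [hctl] at this
      simpa using this
    have hfin : ∀ v : Nat, v = c.toNat - 48 →
        PySem.Int.ofChars? (c :: tl) = Option.map (fun x : Int => x)
          ((g tl true v).bind fun a => some ((a : Int))) := by
      intro v hv
      rcases pvDigit_cases hcd with h|h|h|h|h|h|h|h|h|h <;> subst h <;> subst hv <;>
        first
          | exact p0 tl htl | exact p1 tl htl | exact p2 tl htl | exact p3 tl htl
          | exact p4 tl htl | exact p5 tl htl | exact p6 tl htl | exact p7 tl htl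
          | exact p8 tl htl | exact p9 tl htl
    rw [hctl, hfin _ rfl, gdigits tl (fun x hx => hdigall x (by simp [hx])), hval]
    simp
    omega

theorem pvGo_nil (fuel : Nat) (cur : List Char) (acc : List (List Char)) :
    PySem.Chars.splitOn.go [','] (fuel+1) [] cur acc = (cur.reverse :: acc).reverse := rfl

theorem pvGo_comma (fuel : Nat) (rest cur : List Char) (acc : List (List Char)) :
    PySem.Chars.splitOn.go [','] (fuel+1) (','::rest) cur acc
      = PySem.Chars.splitOn.go [','] fuel rest [] (cur.reverse :: acc) := rfl

theorem pvGo_other (fuel : Nat) (c : Char) (h : c ≠ ',') (rest cur : List Char)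
    (acc : List (List Char)) :
    PySem.Chars.splitOn.go [','] (fuel+1) (c::rest) cur acc
      = PySem.Chars.splitOn.go [','] fuel rest (c::cur) acc := by
  rw [PySem.Chars.splitOn.go.eq_def]
  simp [List.isPrefixOf]
  intro heq
  exact absurd heq.symm h

theorem pvGo_piece : ∀ p : List Char, (',' ∉ p) → ∀ (m : Nat) (rest cur : List Char)
    (acc : List (List Char)),
    PySem.Chars.splitOn.go [','] (p.length + m + 1) (p ++ rest) cur acc
      = PySem.Chars.splitOn.go [','] (m + 1) rest (p.reverse ++ cur) acc := by
  intro p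
  induction p with
  | nil => intro _ m rest cur acc; simp
  | cons c p' ih =>
    intro hc m rest cur acc
    have hcc : c ≠ ',' := fun h => hc (by simp [h])
    have hlen : (c :: p').length + m + 1 = (p'.length + m + 1) + 1 := by simp; omega
    rw [hlen, List.cons_append, pvGo_other _ c hcc,
      ih (fun h => hc (by simp [h])) m rest (c :: cur) acc]
    simp

theorem pvGo_pieces : ∀ (ps : List (List Char)) (p : List Char) (acc : List (List Char)),
    (∀ q ∈ p :: ps, ',' ∉ q) →
    PySem.Chars.splitOn.go [','] ((PySem.Chars.join [','] (p :: ps)).length + 1)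
      (PySem.Chars.join [','] (p :: ps)) [] acc = acc.reverse ++ p :: ps := by
  intro ps
  induction ps with
  | nil =>
    intro p acc hq
    rw [PySem.Chars.join_singleton]
    have h1 : p.length + 1 = p.length + 0 + 1 := by omega
    have h2 : p = p ++ [] := by simp
    rw [h1]
    conv_lhs => rw [show PySem.Chars.splitOn.go [','] (p.length + 0 + 1) p [] acc
      = PySem.Chars.splitOn.go [','] (p.length + 0 + 1) (p ++ []) [] acc from by rw [← h2]]
    rw [pvGo_piece p (hq p (by simp)) 0 [] [] acc, pvGo_nil]
    simp
  | cons p2 ps' ih =>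
    intro p acc hq
    rw [PySem.Chars.join_cons_cons]
    have hassoc : p ++ [','] ++ PySem.Chars.join [','] (p2 :: ps')
        = p ++ (',' :: PySem.Chars.join [','] (p2 :: ps')) := by simp
    rw [hassoc]
    have hlen : (p ++ (',' :: PySem.Chars.join [','] (p2 :: ps'))).length
        = p.length + ((PySem.Chars.join [','] (p2 :: ps')).length + 1) := by
      simp only [List.length_append, List.length_cons]
    rw [hlen, pvGo_piece p (hq p (by simp)) _ _ _ _, pvGo_comma]
    rw [show (p.reverse ++ ([] : List Char)).reverse = p by simp]
    rw [ih p2 (p :: acc) (fun q hqm => hq q (by simp at hqm ⊢; tauto))]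
    simp

theorem pvSplitOn_join (ps : List (List Char)) (hne : ps ≠ [])
    (hq : ∀ q ∈ ps, ',' ∉ q) :
    PySem.Chars.splitOn (PySem.Chars.join [','] ps) [','] = ps := by
  cases ps with
  | nil => exact absurd rfl hne
  | cons p ps' =>
    show PySem.Chars.splitOn.go [','] _ _ [] [] = _
    rw [pvGo_pieces ps' p [] hq]
    simp
-- ---- Part 3: helpers — elements at even positions, and the pendulum arrangement ----

def pvEo : List Int → List Int
  | [] => []
  | [x] => [x]
  | x :: _ :: rest => x :: pvEo rest

def pvZig (l : List Int) : List Int := (pvEo l).reverse ++ pvEo l.tail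

theorem pvEo_cons (x : Int) (xs : List Int) : pvEo (x :: xs) = x :: pvEo xs.tail := by
  cases xs <;> rfl

def pvPiece (x : Int) : List Char := PySem.Int.toChars x ++ [',']

-- ---- Part 4: A's accumulating loop builds exactly the comma-terminated pieces of pvZig ----

theorem pvFoldA : ∀ (l : List Int) (k : Nat) (t : String),
    ((PySem.List.enumerate l (k : Int)).foldl
      (fun tempString p =>
        if PySem.Int.mod p.1 2 == 0 then PySem.Int.toStr p.2 ++ "," ++ tempString
        else tempString ++ PySem.Int.toStr p.2 ++ ",") t).toList =
    (if k % 2 = 0 then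
      ((pvEo l).map pvPiece).reverse.flatten ++ t.toList ++ ((pvEo l.tail).map pvPiece).flatten
    else
      ((pvEo l.tail).map pvPiece).reverse.flatten ++ t.toList ++ ((pvEo l).map pvPiece).flatten) := by
  intro l
  induction l with
  | nil => intro k t; simp [PySem.List.enumerate, pvEo]
  | cons x xs ih =>
    intro k t
    rw [PySem.List.enumerate_cons]
    have hk1 : ((k : Int) + 1) = ((k + 1 : Nat) : Int) := by push_cast; ring
    by_cases hk : k % 2 = 0
    · have hcond : (PySem.Int.mod (k : Int) 2 == 0) = true := by
        have hmod : PySem.Int.mod (k : Int) 2 = ((k % 2 : Nat) : Int) := by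
          simpa using PySem.Int.mod_natCast k 2
        rw [hmod]
        simp [hk]
      simp only [List.foldl_cons, hcond, if_true]
      rw [hk1, ih (k + 1) (PySem.Int.toStr x ++ "," ++ t)]
      have hk1odd : ¬((k + 1) % 2 = 0) := by omega
      rw [if_neg hk1odd, if_pos hk]
      rw [pvEo_cons]
      simp only [List.tail_cons, List.map_cons, List.reverse_cons, List.flatten_append,
        List.flatten_cons, List.flatten_nil, List.append_nil, String.toList_append,
        PySem.Int.toList_toStr]
      simp [pvPiece]
    · have hcond : (PySem.Int.mod (k : Int) 2 == 0) = false := by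
        have hmod : PySem.Int.mod (k : Int) 2 = ((k % 2 : Nat) : Int) := by
          simpa using PySem.Int.mod_natCast k 2
        rw [hmod]
        have h1 : k % 2 = 1 := by omega
        simp [h1]
      simp only [List.foldl_cons, hcond, Bool.false_eq_true, if_false]
      rw [hk1, ih (k + 1) (t ++ PySem.Int.toStr x ++ ",")]
      have hk1even : (k + 1) % 2 = 0 := by omega
      rw [if_pos hk1even, if_neg hk]
      rw [pvEo_cons]
      simp only [List.tail_cons, List.map_cons, List.flatten_cons, String.toList_append,
        PySem.Int.toList_toStr]
      simp [pvPiece]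
theorem pvComma_not_mem_toChars (n : Int) : ',' ∉ PySem.Int.toChars n := by
  intro hmem
  simp only [PySem.Int.toChars] at hmem
  split at hmem
  · rcases List.mem_cons.mp hmem with h | h
    · exact absurd h (by decide)
    · exact absurd (pvToDigits_digits _ _ h) (by decide)
  · exact absurd (pvToDigits_digits _ _ hmem) (by decide)

theorem pvFlattenPieces : ∀ zs : List Int, zs ≠ [] →
    (zs.map pvPiece).flatten
      = PySem.Chars.join [','] (zs.map PySem.Int.toChars) ++ [','] := by
  intro zs
  induction zs with
  | nil => intro h; exact absurd rfl h
  | cons z zs' ih =>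
    intro _
    cases zs' with
    | nil => simp [pvPiece, PySem.Chars.join_singleton]
    | cons w ws =>
      rw [List.map_cons, List.flatten_cons, ih (by simp)]
      simp only [List.map_cons]
      rw [PySem.Chars.join_cons_cons]
      simp [pvPiece]

theorem pvEvens_eq : ∀ xs : List Int,
    (List.range ((xs.length + 1) / 2)).filterMap (fun k => xs[2 * k]?) = pvEo xs := by
  intro xs
  induction xs using pvEo.induct with
  | case1 => simp [pvEo]
  | case2 x => simp [pvEo, List.range_succ_eq_map]
  | case3 x y rest ih =>
    have hlen : ((x :: y :: rest).length + 1) / 2 = (rest.length + 1) / 2 + 1 := by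
      simp [List.length_cons]
      omega
    rw [hlen, List.range_succ_eq_map, List.filterMap_cons, List.filterMap_map]
    simp only [Nat.mul_zero, List.getElem?_cons_zero]
    show x :: List.filterMap _ (List.range ((rest.length + 1) / 2)) = pvEo (x :: y :: rest)
    have harg : ∀ k : Nat, ((fun k => (x :: y :: rest)[2 * k]?) ∘ Nat.succ) k
        = (fun k => rest[2 * k]?) k := by
      intro k
      simp only [Function.comp_apply]
      have h2 : 2 * Nat.succ k = (2 * k) + 1 + 1 := by omega
      rw [h2]
      simp
    rw [List.filterMap_congr (by intro k _; exact harg k), ih]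
    rfl
theorem pvSlice0 (xs : List Int) : PySem.List.slice? xs (some 0) none 2 = some (pvEo xs) := by
  simp only [PySem.List.slice?, PySem.List.sliceIndices]
  norm_num
  have hcount : (if 0 < xs.length then (((xs.length : Int) + 2 - 1) / 2).toNat else 0)
      = (xs.length + 1) / 2 := by split <;> omega
  have harg : ∀ k : Nat, (2 * (k : Int)).toNat = 2 * k := fun k => by omega
  simp only [hcount, harg]
  exact pvEvens_eq xs

theorem pvSlice1 (xs : List Int) : PySem.List.slice? xs (some 1) none 2 = some (pvEo xs.tail) := by
  cases xs with
  | nil => rfl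
  | cons x xs' =>
    simp only [PySem.List.slice?, PySem.List.sliceIndices]
    norm_num
    have hcount : (if 0 < xs'.length then (((xs'.length : Int) + 2 - 1) / 2).toNat else 0)
        = (xs'.length + 1) / 2 := by split <;> omega
    have harg : ∀ k : Nat, (x :: xs')[(1 + 2 * (k : Int)).toNat]? = xs'[2 * k]? := by
      intro k
      have h1 : (1 + 2 * (k : Int)).toNat = 2 * k + 1 := by omega
      rw [h1]
      simp
    simp only [hcount]
    rw [List.filterMap_congr (fun k _ => harg k)]
    exact pvEvens_eq xs'

-- ---- Part 5: assembly ----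

theorem pvEo_ne_nil {l : List Int} (h : l ≠ []) : pvEo l ≠ [] := by
  cases l with
  | nil => exact absurd rfl h
  | cons x xs => rw [pvEo_cons]; simp

theorem pvZig_ne_nil {l : List Int} (h : l ≠ []) : pvZig l ≠ [] := by
  unfold pvZig
  intro hz
  rcases List.append_eq_nil_iff.mp hz with ⟨h1, _⟩
  exact pvEo_ne_nil h (by simpa using h1)

theorem pvB_eq (values : List Int) :
    pendulum_alt values = pvZig (PySem.List.sorted values (fun x => x) false) := by
  simp only [pendulum_alt]
  rw [pvSlice0, Option.getD_some, PySem.List.slice?_none_none_neg_one, Option.getD_some,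
    pvSlice1, Option.getD_some]
  rfl

theorem pvMain (values : List Int) (hpre : values ≠ []) :
    pendulum values = pendulum_alt values := by
  rw [pvB_eq]
  set l := PySem.List.sorted values (fun x => x) false with hl
  have hlne : l ≠ [] := fun h0 =>
    hpre ((PySem.List.sorted_eq_nil_iff values (fun x => x) false).mp (hl ▸ h0))
  have hzne : pvZig l ≠ [] := pvZig_ne_nil hlne
  simp only [pendulum, ← hl]
  set T := (PySem.List.enumerate l).foldl
    (fun tempString p =>
      if PySem.Int.mod p.1 2 == 0 then PySem.Int.toStr p.2 ++ "," ++ tempString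
      else tempString ++ PySem.Int.toStr p.2 ++ ",") "" with hTdef
  have hT : T.toList = PySem.Chars.join [','] ((pvZig l).map PySem.Int.toChars) ++ [','] := by
    have h0 := pvFoldA l 0 ""
    simp only [Nat.cast_zero] at h0
    rw [if_pos trivial] at h0
    rw [hTdef]
    show ((PySem.List.enumerate l 0).foldl _ "").toList = _
    rw [h0]
    have hmt : ("" : String).toList = [] := rfl
    rw [hmt, ← pvFlattenPieces (pvZig l) hzne]
    unfold pvZig
    rw [List.map_append, List.flatten_append, ← List.map_reverse]
    simp
  have hslice : (PySem.Str.slice T none (some (-1))).toList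
      = PySem.Chars.join [','] ((pvZig l).map PySem.Int.toChars) := by
    rw [PySem.Str.slice_to_neg_one, hT]
    exact List.dropLast_concat
  have hcommafree : ∀ q ∈ (pvZig l).map PySem.Int.toChars, ',' ∉ q := by
    intro q hq
    rcases List.mem_map.mp hq with ⟨x, _, rfl⟩
    exact pvComma_not_mem_toChars x
  have hsplitChars : PySem.Chars.split? (PySem.Str.slice T none (some (-1))).toList [',']
      = some ((pvZig l).map PySem.Int.toChars) := by
    rw [hslice]
    simp only [PySem.Chars.split?, List.isEmpty_cons, Bool.false_eq_true, if_false]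
    rw [pvSplitOn_join _ (by simpa using hzne) hcommafree]
  have hsplit : PySem.Str.split? (PySem.Str.slice T none (some (-1))) ","
      = some ((pvZig l).map (fun x => String.ofList (PySem.Int.toChars x))) := by
    have hm := PySem.Str.split?_map (PySem.Str.slice T none (some (-1))) ","
    have hsep : ("," : String).toList = [','] := rfl
    rw [hsep, hsplitChars] at hm
    cases hX : PySem.Str.split? (PySem.Str.slice T none (some (-1))) "," with
    | none => rw [hX] at hm; simp at hm
    | some L =>
      rw [hX] at hm
      simp only [Option.map_some, Option.some.injEq] at hm
      congr 1
      have hid : (L.map String.toList).map String.ofList = L := by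
        rw [List.map_map,
          show (String.ofList ∘ String.toList) = id from funext fun s => String.ofList_toList]
        exact List.map_id L
      rw [← hid, hm, List.map_map]
      rfl
  rw [hsplit, Option.getD_some, List.map_map]
  have : ((fun s => (PySem.Int.ofStr? s).getD 0) ∘ fun x => String.ofList (PySem.Int.toChars x))
      = fun x : Int => x := by
    funext x
    simp only [Function.comp_apply, PySem.Int.ofStr?_ofList, pvRoundtrip, Option.getD_some]
  rw [this, List.map_id']


-- ===== VERDICT (by name: the statement is the Claim_ definition above) =====
theorem pendulum_spec : Claim_equal_pendulum := by
  intro values _ hpre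
  unfold Spec_pendulum
  exact pvMain values hpre
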